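-- pv_equiv track=rewrite | github.com/delfianto/compose | utils/compose.py | deduplicate_flags
-- ===== SOURCE A (Python) =====
-- def deduplicate_flags(combined_args):
--     """Deduplicate flags, preserving order and handling --flag=value patterns."""
--     all_flags = []
--     for flag in combined_args:
--         if flag in all_flags:
--             continue
--
--         if "=" in flag:
--             flag_name = flag.split("=")[0]
--             if any(f.startswith(flag_name) for f in all_flags):
--                 continue
--
--         all_flags.append(flag)
--
--     return all_flags
-- ===== SOURCE B (Python) =====
-- def deduplicate_flags(combined_args):
--     """Deduplicate flags, preserving order and handling --flag=value patterns."""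
--     all_flags = []
--     seen = set()       # exact-membership index of all_flags
--     prefixes = set()   # every prefix of every kept flag
--     for flag in combined_args:
--         if flag in seen:
--             continue
--         if "=" in flag and flag.split("=")[0] in prefixes:
--             continue
--         all_flags.append(flag)
--         seen.add(flag)
--         for i in range(len(flag) + 1):
--             prefixes.add(flag[:i])
--     return all_flags
-- ===== Notes on version B (the rewrite author's own statement) =====
-- stated objective: faster
-- what changed: Replaces the inner scans over all_flags (list membership and the any-startswith pass) by two hash sets maintained alongside the output: an exact-membership set and a set of all prefixes of kept flags, so each flag is decided by two O(L) set lookups instead of an O(n*L) scan.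
import Mathlib
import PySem

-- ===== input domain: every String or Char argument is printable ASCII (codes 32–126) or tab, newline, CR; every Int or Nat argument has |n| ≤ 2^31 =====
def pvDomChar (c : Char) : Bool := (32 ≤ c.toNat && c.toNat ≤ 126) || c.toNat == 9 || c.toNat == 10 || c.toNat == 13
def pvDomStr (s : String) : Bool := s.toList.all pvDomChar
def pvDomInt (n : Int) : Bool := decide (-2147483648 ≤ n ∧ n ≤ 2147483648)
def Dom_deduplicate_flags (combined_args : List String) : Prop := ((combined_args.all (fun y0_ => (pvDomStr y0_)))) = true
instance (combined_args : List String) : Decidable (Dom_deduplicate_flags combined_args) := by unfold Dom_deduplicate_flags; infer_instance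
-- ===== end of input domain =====

-- B replaces A's inner scans over all_flags by a membership set plus a set of all
-- prefixes of kept flags (faster: two set lookups per flag instead of a full scan).

-- ===== PORT A =====
def deduplicate_flags (combined_args : List String) : List String :=
  combined_args.foldl (fun all_flags flag =>
    if flag ∈ all_flags then all_flags
    else if PySem.Str.isIn "=" flag then
      let flag_name := (PySem.List.pyGet? ((PySem.Str.split? flag "=").getD []) 0).getD ""
      if all_flags.any (fun f => PySem.Str.startswith f flag_name) then all_flags
      else all_flags ++ [flag]
    else all_flags ++ [flag]) []

-- ===== PORT B =====
-- the inner 'for i in range(len(flag)+1): prefixes.add(flag[:i])' loop of Source B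
def dedupAddPrefixes (prefixes : PySem.Set String) (flag : String) : PySem.Set String :=
  (PySem.List.pyRange 0 ((PySem.Str.len flag : Int) + 1) 1).foldl
    (fun s i => PySem.Set.add s (PySem.Str.slice flag none (some i))) prefixes

-- one iteration of Source B's main loop; state = (all_flags, seen, prefixes)
def dedupStep (st : List String × PySem.Set String × PySem.Set String) (flag : String) :
    List String × PySem.Set String × PySem.Set String :=
  let (all_flags, seen, prefixes) := st
  if PySem.Set.contains seen flag then st
  else if PySem.Str.isIn "=" flag &&
          PySem.Set.contains prefixes
            ((PySem.List.pyGet? ((PySem.Str.split? flag "=").getD []) 0).getD "") then st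
  else (all_flags ++ [flag], PySem.Set.add seen flag, dedupAddPrefixes prefixes flag)

def deduplicate_flags_alt (combined_args : List String) : List String :=
  (combined_args.foldl dedupStep ([], PySem.Set.empty, PySem.Set.empty)).1

-- ===== PRECONDITION & SPEC =====
def Spec_deduplicate_flags (combined_args : List String) (out : List String) : Prop := out = deduplicate_flags_alt combined_args
instance (combined_args : List String) (out : List String) : Decidable (Spec_deduplicate_flags combined_args out) := by unfold Spec_deduplicate_flags; infer_instance

-- ===== CLAIM (what is proved, stated in full; the proofs are below) =====
def Claim_equal_deduplicate_flags : Prop := ∀ (combined_args : List String), Dom_deduplicate_flags combined_args → Spec_deduplicate_flags combined_args (deduplicate_flags combined_args)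

-- ===== LEMMAS AND PROOFS =====

-- loop invariant: seen indexes all_flags exactly, prefixes holds exactly the prefixes of kept flags
def DedupInv (all_flags seen prefixes : List String) : Prop :=
  (∀ x, x ∈ seen ↔ x ∈ all_flags) ∧
  (∀ p, p ∈ prefixes ↔ ∃ f ∈ all_flags, p.toList <+: f.toList)

lemma slice_take_toList (flag : String) (i : Int) (h : 0 ≤ i) :
    (PySem.Str.slice flag none (some i)).toList = flag.toList.take i.toNat := by
  simp; exact PySem.List.slice_to flag.toList h

lemma mem_dedupAddPrefixes (prefixes : PySem.Set String) (flag p : String) :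
    p ∈ dedupAddPrefixes prefixes flag ↔ p ∈ prefixes ∨ p.toList <+: flag.toList := by
  unfold dedupAddPrefixes
  rw [PySem.Set.mem_foldl_add]
  refine or_congr Iff.rfl ?_
  constructor
  · rintro ⟨i, hi, rfl⟩
    obtain ⟨h0, _⟩ := (PySem.List.mem_pyRange_one).mp hi
    rw [slice_take_toList flag i h0]
    exact List.take_prefix _ _
  · intro hpre
    refine ⟨(p.toList.length : Int), ?_, ?_⟩
    · rw [PySem.List.mem_pyRange_one]
      have := hpre.length_le
      simp only [PySem.Str.len_eq] at *
      constructor <;> [positivity; exact_mod_cast Nat.lt_succ_of_le this]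
    · apply String.toList_inj.mp
      rw [slice_take_toList flag _ (by positivity)]
      simpa using List.prefix_iff_eq_take.mp hpre

lemma startswith_any (all_flags : List String) (name : String) :
    all_flags.any (fun f => PySem.Str.startswith f name) = true ↔
      ∃ f ∈ all_flags, name.toList <+: f.toList := by
  rw [List.any_eq_true]
  refine exists_congr fun f => and_congr_right fun _ => ?_
  rw [PySem.Str.startswith_eq, PySem.Chars.startswith_iff]

lemma dedup_fold_agree (l : List String) :
    ∀ (all_flags seen prefixes : List String), DedupInv all_flags seen prefixes →
    (l.foldl dedupStep (all_flags, seen, prefixes)).1 =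
      l.foldl (fun all_flags flag =>
        if flag ∈ all_flags then all_flags
        else if PySem.Str.isIn "=" flag then
          let flag_name := (PySem.List.pyGet? ((PySem.Str.split? flag "=").getD []) 0).getD ""
          if all_flags.any (fun f => PySem.Str.startswith f flag_name) then all_flags
          else all_flags ++ [flag]
        else all_flags ++ [flag]) all_flags := by
  induction l with
  | nil => intro all seen pref _; rfl
  | cons flag l ih =>
    intro all seen pref hinv
    obtain ⟨hseen, hpref⟩ := hinv
    simp only [List.foldl_cons]
    set name := (PySem.List.pyGet? ((PySem.Str.split? flag "=").getD []) 0).getD "" with hname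
    by_cases h1 : flag ∈ all
    · have hstep : dedupStep (all, seen, pref) flag = (all, seen, pref) := by
        simp [dedupStep, (hseen flag).mpr h1]
      rw [hstep, if_pos h1]
      exact ih all seen pref ⟨hseen, hpref⟩
    · have hns : flag ∉ seen := fun hm => h1 ((hseen flag).mp hm)
      have hinv' : DedupInv (all ++ [flag]) (PySem.Set.add seen flag)
          (dedupAddPrefixes pref flag) := by
        constructor
        · intro x
          rw [PySem.Set.mem_add, hseen x]
          simp [or_comm]
        · intro p
          rw [mem_dedupAddPrefixes]
          constructor
          · rintro (hp | hp)
            · obtain ⟨f, hf, hfp⟩ := (hpref p).mp hp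
              exact ⟨f, by simp [hf], hfp⟩
            · exact ⟨flag, by simp, hp⟩
          · rintro ⟨f, hf, hfp⟩
            rcases List.mem_append.mp hf with hf | hf
            · exact Or.inl ((hpref p).mpr ⟨f, hf, hfp⟩)
            · rw [List.mem_singleton] at hf; subst hf; exact Or.inr hfp
      by_cases h2 : PySem.Str.isIn "=" flag = true
      · by_cases h3 : all.any (fun f => PySem.Str.startswith f name) = true
        · have h2' : PySem.Chars.isIn ['='] flag.toList = true := by simpa using h2
          have hmp : name ∈ pref := (hpref name).mpr ((startswith_any all name).mp h3)
          have hstep : dedupStep (all, seen, pref) flag = (all, seen, pref) := by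
            simp [dedupStep, hns, h2', hmp, ← hname]
          rw [hstep, if_neg h1, if_pos h2]
          simp only [h3, if_pos]
          exact ih all seen pref ⟨hseen, hpref⟩
        · have hmp : name ∉ pref := fun hm => h3 ((startswith_any all name).mpr ((hpref name).mp hm))
          have hstep : dedupStep (all, seen, pref) flag =
              (all ++ [flag], PySem.Set.add seen flag, dedupAddPrefixes pref flag) := by
            simp [dedupStep, hns, hmp, ← hname]
          rw [hstep, if_neg h1, if_pos h2]
          simp only [h3, if_neg, Bool.not_eq_true]
          exact ih _ _ _ hinv'
      · have hstep : dedupStep (all, seen, pref) flag =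
            (all ++ [flag], PySem.Set.add seen flag, dedupAddPrefixes pref flag) := by
          have h2' : ¬ (PySem.Chars.isIn ['='] flag.toList = true) := by simpa using h2
          simp [dedupStep, hns, h2']
        rw [hstep, if_neg h1, if_neg h2]
        exact ih _ _ _ hinv'

-- ===== VERDICT (by name: the statement is the Claim_ definition above) =====
theorem deduplicate_flags_spec : Claim_equal_deduplicate_flags := by
  intro combined_args _
  unfold Spec_deduplicate_flags deduplicate_flags deduplicate_flags_alt
  exact (dedup_fold_agree combined_args [] [] [] ⟨by simp, by simp⟩).symm
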